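-- pv_equiv track=rewrite | github.com/theY4Kman/airhorn | linux/xfce4-python/setup.py | parse_cflags
-- ===== SOURCE A (Python) =====
-- def parse_cflags(args):
--     kwargs = {
--         'include_dirs': [],
--         'libraries': [],
--         'library_dirs': [],
--     }
--     for arg in args:
--         if arg[0] != '-' or len(arg) < 3:
--             continue
--
--         opt, value = arg[1], arg[2:]
--         if opt == 'I':
--             kwargs['include_dirs'].append(value)
--         elif opt == 'L':
--             kwargs['library_dirs'].append(value)
--         elif opt == 'l':
--             kwargs['libraries'].append(value)
--
--     return kwargs
-- ===== SOURCE B (Python) =====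
-- def parse_cflags(args):
--     def pick(opt):
--         return [a[2:] for a in args if len(a) >= 3 and a[0] == '-' and a[1] == opt]
--     return {
--         'include_dirs': pick('I'),
--         'libraries': pick('l'),
--         'library_dirs': pick('L'),
--     }
-- ===== Notes on version B (the rewrite author's own statement) =====
-- stated objective: alternative
-- what changed: Replaces the single loop with an if/elif dispatch mutating three lists by three independent filtering passes, one list comprehension per flag category.
import Mathlib
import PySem

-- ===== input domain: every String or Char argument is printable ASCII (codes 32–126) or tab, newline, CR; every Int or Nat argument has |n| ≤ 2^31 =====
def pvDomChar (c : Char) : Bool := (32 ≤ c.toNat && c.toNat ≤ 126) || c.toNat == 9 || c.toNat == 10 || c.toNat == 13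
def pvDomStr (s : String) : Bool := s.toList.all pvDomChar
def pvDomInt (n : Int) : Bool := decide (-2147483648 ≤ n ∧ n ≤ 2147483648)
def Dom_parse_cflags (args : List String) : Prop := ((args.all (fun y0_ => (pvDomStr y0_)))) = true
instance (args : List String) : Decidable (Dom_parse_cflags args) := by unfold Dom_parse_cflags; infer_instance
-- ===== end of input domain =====

-- Header: B builds the result with three independent filtering passes (one per flag kind)
-- instead of A's single loop with an if/elif dispatch; same cost, different traversal shape.

-- ===== PORT A =====
-- A's loop body: dispatch on arg[1] and append arg[2:] to the matching list.
def pvStepA (acc : List String × List String × List String) (arg : String) :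
    List String × List String × List String :=
  match PySem.Str.pyGet? arg 0 with
  | none => acc  -- Python raises IndexError here; excluded by Pre_
  | some c0 =>
    if c0 ≠ '-' ∨ PySem.Str.len arg < 3 then acc
    else
      match PySem.Str.pyGet? arg 1 with
      | none => acc  -- unreachable: len arg ≥ 3
      | some opt =>
        let value := PySem.Str.slice arg (some 2) none
        if opt = 'I' then (acc.1 ++ [value], acc.2.1, acc.2.2)
        else if opt = 'L' then (acc.1, acc.2.1, acc.2.2 ++ [value])
        else if opt = 'l' then (acc.1, acc.2.1 ++ [value], acc.2.2)
        else acc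

def parse_cflags (args : List String) : List (String × List String) :=
  let st := args.foldl pvStepA ([], [], [])
  [("include_dirs", st.1), ("libraries", st.2.1), ("library_dirs", st.2.2)]

-- ===== PORT B =====
-- B's comprehension guard: len(a) >= 3 and a[0] == '-' and a[1] == opt
def pvPickB (opt : Char) (args : List String) : List String :=
  (args.filter (fun a =>
      decide (3 ≤ PySem.Str.len a) && (PySem.Str.pyGet? a 0 == some '-')
        && (PySem.Str.pyGet? a 1 == some opt))).map
    (fun a => PySem.Str.slice a (some 2) none)

def parse_cflags_alt (args : List String) : List (String × List String) :=
  [("include_dirs", pvPickB 'I' args),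
   ("libraries", pvPickB 'l' args),
   ("library_dirs", pvPickB 'L' args)]

-- ===== PRECONDITION & SPEC =====
-- Pre_ excludes lists containing an empty string: there A raises IndexError at arg[0].
def Pre_parse_cflags (args : List String) : Prop := "" ∉ args
instance (args : List String) : Decidable (Pre_parse_cflags args) := by unfold Pre_parse_cflags; infer_instance
def pvWitness_parse_cflags : List String := ["-Ifoo", "-Lbar", "-lbaz", "-O2", "-I"]

def Spec_parse_cflags (args : List String) (out : List (String × List String)) : Prop := out = parse_cflags_alt args
instance (args : List String) (out : List (String × List String)) : Decidable (Spec_parse_cflags args out) := by unfold Spec_parse_cflags; infer_instance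

-- ===== CLAIM (what is proved, stated in full; the proofs are below) =====
def Claim_equal_parse_cflags : Prop := ∀ (args : List String), Dom_parse_cflags args → Pre_parse_cflags args → Spec_parse_cflags args (parse_cflags args)

-- ===== LEMMAS AND PROOFS =====

-- the per-element contribution of B's three filters
def pvPick1 (opt : Char) (a : String) : List String :=
  if (decide (3 ≤ PySem.Str.len a) && (PySem.Str.pyGet? a 0 == some '-')
      && (PySem.Str.pyGet? a 1 == some opt)) then [PySem.Str.slice a (some 2) none] else []

lemma pvGet_zero (cs : List Char) : PySem.List.pyGet? cs 0 = cs[0]? := by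
  rcases cs with _ | ⟨c, tl⟩ <;> simp [PySem.List.pyGet?, PySem.List.pyIdx?]
lemma pvGet_one (cs : List Char) : PySem.List.pyGet? cs 1 = cs[1]? := by
  rcases cs with _ | ⟨c, _ | ⟨c1, tl⟩⟩ <;> simp [PySem.List.pyGet?, PySem.List.pyIdx?]

lemma pvPickB_cons (opt : Char) (a : String) (args : List String) :
    pvPickB opt (a :: args) = pvPick1 opt a ++ pvPickB opt args := by
  simp [pvPickB, pvPick1]
  split_ifs with h <;> simp [h]

lemma pvStepA_eq (a : String) (ha : a ≠ "") (acc : List String × List String × List String) :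
    pvStepA acc a =
      (acc.1 ++ pvPick1 'I' a, acc.2.1 ++ pvPick1 'l' a, acc.2.2 ++ pvPick1 'L' a) := by
  have hnil : a.toList ≠ [] := by
    intro e; apply ha; have := congrArg String.ofList e; simpa using this
  rcases hcs : a.toList with _ | ⟨c0, tl⟩
  · exact absurd hcs hnil
  rcases tl with _ | ⟨c1, rest⟩
  · simp [pvStepA, pvPick1, hcs, pvGet_zero, pvGet_one]
  · by_cases h3 : 1 ≤ rest.length
    · have h3' : (3 : Int) ≤ (rest.length : Int) + 1 + 1 := by omega
      have h3n : ¬ ((rest.length : Int) + 1 + 1 < 3) := by omega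
      by_cases hc0 : c0 = '-'
      · subst hc0
        by_cases hI : c1 = 'I'
        · simp [pvStepA, pvPick1, hcs, pvGet_one, hI, h3n]
        · by_cases hL : c1 = 'L'
          · simp [pvStepA, pvPick1, hcs, pvGet_one, hI, hL, h3n]
          · by_cases hl : c1 = 'l'
            · simp [pvStepA, pvPick1, hcs, pvGet_zero, pvGet_one, hI, hL, hl, h3', h3n]
            · simp [pvStepA, pvPick1, hcs, pvGet_zero, pvGet_one, hI, hL, hl, h3', h3n]
      · simp [pvStepA, pvPick1, hcs, pvGet_zero, pvGet_one, hc0]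
    · have h3' : ¬ ((3 : Int) ≤ (rest.length : Int) + 1 + 1) := by omega
      have h3n : (rest.length : Int) + 1 + 1 < 3 := by omega
      simp [pvStepA, pvPick1, hcs, pvGet_zero, pvGet_one, h3', h3n]

lemma pvLoopA_eq (args : List String) (h : "" ∉ args)
    (i l d : List String) :
    args.foldl pvStepA (i, l, d) =
      (i ++ pvPickB 'I' args, l ++ pvPickB 'l' args, d ++ pvPickB 'L' args) := by
  induction args generalizing i l d with
  | nil => simp [pvPickB]
  | cons a args ih =>
    have ha : a ≠ "" := fun e => h (e ▸ List.mem_cons_self ..)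
    have h' : "" ∉ args := fun e => h (List.mem_cons_of_mem _ e)
    simp only [List.foldl_cons, pvStepA_eq a ha, ih h', pvPickB_cons, List.append_assoc]

-- ===== VERDICT (by name: the statement is the Claim_ definition above) =====
theorem parse_cflags_spec : Claim_equal_parse_cflags := by
  intro args _ hpre
  unfold Spec_parse_cflags parse_cflags parse_cflags_alt
  simp only [pvLoopA_eq args hpre, List.nil_append]
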